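-- pv_equiv track=rewrite | github.com/dogunyoye/advent-of-code-2015 | day14/day14.py | __race_reindeer
-- ===== SOURCE A (Python) =====
-- def __race_reindeer(r, time) -> int:
--     speed, active, resting = r[1], r[2], r[3]
--     covered = speed * active
--     div = time // (active + resting)
--     rem = time % (active + resting)
--
--     result = covered * div
--
--     if rem < active:
--         result += rem * speed
--         return result
--
--     while rem != 0:
--         rem //= (active + resting)
--         result += covered
--
--     return result
-- ===== SOURCE B (Python) =====
-- def __race_reindeer(r, time) -> int:
--     speed, active, resting = r[1], r[2], r[3]
--     period = active + resting
--     cycles = time // period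
--     rem = time % period
--     distance = cycles * speed * active
--     for second in range(rem):
--         if second < active:
--             distance += speed
--     return distance
-- ===== Notes on version B (the rewrite author's own statement) =====
-- stated objective: idiomatic
-- what changed: B replaces A's closed-form floor-division arithmetic with branch and quirky while-loop by the natural AoC style: multiply out the full cycles, then simulate the partial cycle second-by-second, adding speed for each active second.
-- outside the precondition, e.g. on __race_reindeer([0, 14, -3, 5], 7): A returns -168, B returns -126; on __race_reindeer([0, 2, 10, -13], 5): A returns -42, B returns -40
import Mathlib
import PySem

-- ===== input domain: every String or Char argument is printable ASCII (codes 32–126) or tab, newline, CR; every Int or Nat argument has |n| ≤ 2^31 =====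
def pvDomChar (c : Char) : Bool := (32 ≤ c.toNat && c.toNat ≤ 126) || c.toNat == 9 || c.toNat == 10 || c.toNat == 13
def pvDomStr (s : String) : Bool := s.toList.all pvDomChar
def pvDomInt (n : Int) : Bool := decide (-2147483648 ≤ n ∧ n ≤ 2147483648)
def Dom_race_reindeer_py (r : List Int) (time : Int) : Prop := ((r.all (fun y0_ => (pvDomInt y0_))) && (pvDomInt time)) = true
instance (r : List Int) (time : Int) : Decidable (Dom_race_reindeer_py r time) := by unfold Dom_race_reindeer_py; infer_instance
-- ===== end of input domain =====

-- B multiplies out the full cycles and simulates the partial cycle second-by-second,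
-- replacing A's closed-form branch/while arithmetic; proved equal on Pre_ (see its comment).

-- ===== PORT A =====
-- fuel-bounded transcription of A's `while rem != 0: rem //= (active+resting); result += covered`
-- (fuel only makes the loop total; under Pre_ the loop body runs at most once and fuel is never exhausted)
def raceLoopA (p covered : Int) : Nat → Int → Int → Int
  | 0, _, result => result
  | fuel + 1, rem, result =>
    if rem = 0 then result
    else raceLoopA p covered fuel (PySem.Int.floordiv rem p) (result + covered)

def race_reindeer_py (r : List Int) (time : Int) : Int :=
  match PySem.List.pyGet? r 1, PySem.List.pyGet? r 2, PySem.List.pyGet? r 3 with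
  | some speed, some active, some resting =>
    let covered := speed * active
    let div := PySem.Int.floordiv time (active + resting)
    let rem := PySem.Int.mod time (active + resting)
    let result := covered * div
    if rem < active then result + rem * speed
    else raceLoopA (active + resting) covered (rem.natAbs + 2) rem result
  | _, _, _ => 0  -- IndexError (len(r) < 4): excluded by Pre_

-- ===== PORT B =====
def race_reindeer_py_alt (r : List Int) (time : Int) : Int :=
  match PySem.List.pyGet? r 1 with
  | none => 0  -- IndexError (len(r) < 2): excluded by Pre_
  | some speed =>
    match PySem.List.pyGet? r 2 with
    | none => 0  -- IndexError: excluded by Pre_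
    | some active =>
      match PySem.List.pyGet? r 3 with
      | none => 0  -- IndexError: excluded by Pre_
      | some resting =>
        let period := active + resting
        let cycles := PySem.Int.floordiv time period
        let rem := PySem.Int.mod time period
        (PySem.List.pyRange 0 rem 1).foldl
          (fun distance second => if second < active then distance + speed else distance)
          (cycles * speed * active)

-- ===== PRECONDITION & SPEC =====
-- Pre_ excludes len(r) < 4 and active+resting = 0 (A raises IndexError / ZeroDivisionError), and
-- nonsense reindeer (negative active, or non-positive cycle period) whose value is not already forced
-- (zero speed, or a whole number of cycles): on those A's floor-division/while-loop values are
-- implementation accidents a time simulation cannot mean.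
def Pre_race_reindeer_py (r : List Int) (time : Int) : Prop :=
  4 ≤ r.length ∧ r.getD 2 0 + r.getD 3 0 ≠ 0 ∧
    ((0 ≤ r.getD 2 0 ∧ 0 < r.getD 2 0 + r.getD 3 0) ∨ r.getD 1 0 = 0 ∨
      (r.getD 2 0 + r.getD 3 0) ∣ time)
instance (r : List Int) (time : Int) : Decidable (Pre_race_reindeer_py r time) := by
  unfold Pre_race_reindeer_py; infer_instance

def pvWitness_race_reindeer_py : List Int × Int := ([0, 14, 10, 127], 1000)

def Spec_race_reindeer_py (r : List Int) (time : Int) (out : Int) : Prop := out = race_reindeer_py_alt r time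
instance (r : List Int) (time : Int) (out : Int) : Decidable (Spec_race_reindeer_py r time out) := by unfold Spec_race_reindeer_py; infer_instance

-- ===== CLAIM (what is proved, stated in full; the proofs are below) =====
def Claim_equal_race_reindeer_py : Prop := ∀ (r : List Int) (time : Int), Dom_race_reindeer_py r time → Pre_race_reindeer_py r time → Spec_race_reindeer_py r time (race_reindeer_py r time)

-- ===== LEMMAS AND PROOFS =====

-- B's per-second loop over the partial cycle adds speed exactly min rem active times
lemma foldl_partial_cycle (a s : Int) (ha : 0 ≤ a) (m : Nat) (init : Int) :
    (PySem.List.pyRange 0 (m : Int) 1).foldl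
      (fun distance second => if second < a then distance + s else distance) init
      = init + s * min (m : Int) a := by
  induction m generalizing init with
  | zero =>
    rw [show ((0 : Nat) : Int) = 0 from rfl, PySem.List.pyRange_one_eq_nil le_rfl,
      List.foldl_nil, Int.min_eq_left ha, mul_zero, add_zero]
  | succ n ih =>
    rw [show ((n + 1 : Nat) : Int) = (n : Int) + 1 by push_cast; ring,
        PySem.List.pyRange_one_succ_right (by positivity), List.foldl_append]
    simp only [List.foldl_cons, List.foldl_nil, ih]
    by_cases h : (n : Int) < a
    · rw [if_pos h, Int.min_eq_left (by omega), Int.min_eq_left (by omega)]; ring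
    · rw [if_neg h, Int.min_eq_right (by omega), Int.min_eq_right (by omega)]

-- A's while loop never changes result when covered = 0
lemma raceLoopA_covered_zero (p : Int) (fuel : Nat) (rem res : Int) :
    raceLoopA p 0 fuel rem res = res := by
  induction fuel generalizing rem res with
  | zero => rfl
  | succ n ih => unfold raceLoopA; split <;> simp [ih]

-- ===== VERDICT (by name: the statement is the Claim_ definition above) =====
theorem race_reindeer_py_spec : Claim_equal_race_reindeer_py := by
  intro r time _ hpre
  obtain ⟨hlen, hpne, hdisj⟩ := hpre
  match r, hlen with
  | x0 :: x1 :: x2 :: x3 :: rest, _ =>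
    simp only [List.getD, List.getElem?_cons_succ, List.getElem?_cons_zero,
      Option.getD_some] at hpne hdisj
    unfold Spec_race_reindeer_py race_reindeer_py race_reindeer_py_alt
    have e1 : PySem.List.pyGet? (x0 :: x1 :: x2 :: x3 :: rest) 1 = some x1 := by
      rw [show (1:Int) = ((1:Nat):Int) from rfl, PySem.List.pyGet?_natCast]; simp
    have e2 : PySem.List.pyGet? (x0 :: x1 :: x2 :: x3 :: rest) 2 = some x2 := by
      rw [show (2:Int) = ((2:Nat):Int) from rfl, PySem.List.pyGet?_natCast]; simp
    have e3 : PySem.List.pyGet? (x0 :: x1 :: x2 :: x3 :: rest) 3 = some x3 := by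
      rw [show (3:Int) = ((3:Nat):Int) from rfl, PySem.List.pyGet?_natCast]; simp
    rw [e1, e2, e3]
    simp only []
    set p := x2 + x3 with hpdef
    set rem := PySem.Int.mod time p with hrem
    rcases hdisj with ⟨ha, hp⟩ | hs | hdvd
    · -- sensible reindeer: 0 ≤ active, 0 < period
      have hrem0 : 0 ≤ rem := PySem.Int.mod_nonneg time hp
      have hremp : rem < p := PySem.Int.mod_lt time hp
      obtain ⟨m, hm⟩ : ∃ m : Nat, rem = (m : Int) := ⟨rem.toNat, (Int.toNat_of_nonneg hrem0).symm⟩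
      rw [hm, foldl_partial_cycle x2 x1 ha m]
      by_cases hlt : rem < x2
      · rw [if_pos (hm ▸ hlt), Int.min_eq_left (by omega)]
        ring
      · rw [if_neg (hm ▸ hlt), Int.min_eq_right (by omega)]
        by_cases hm0 : (m : Int) = 0
        · have hx2 : x2 = 0 := by omega
          simp only [raceLoopA, hm0, if_pos, hx2]
          ring
        · have hmp : (m : Int) < p := hm ▸ hremp
          have hdiv0 : PySem.Int.floordiv (m : Int) p = 0 := by
            rw [PySem.Int.floordiv_eq_iff_of_pos hp]
            constructor <;> [simp; simpa using hmp]
          simp only [raceLoopA, hm0, if_false, hdiv0, if_pos]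
          ring
    · -- zero speed: both distances are 0
      subst hs
      simp only [zero_mul, mul_zero, add_zero, ite_self, List.foldl_fixed,
        raceLoopA_covered_zero]
    · -- time is a whole number of cycles: rem = 0 on both sides
      have hrem0 : rem = 0 := by
        rw [hrem, PySem.Int.mod_eq_zero_iff_dvd]; exact hdvd
      rw [hrem0, PySem.List.pyRange_one_eq_nil le_rfl, List.foldl_nil]
      by_cases h2 : (0 : Int) < x2
      · rw [if_pos h2]; ring
      · rw [if_neg h2]
        simp only [raceLoopA, if_pos]
        ring
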